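-- pv_equiv track=rewrite | github.com/risingfruition/AOC_2024 | d24.py | wires_to_num
-- ===== SOURCE A (Python) =====
-- def wires_to_num(values: dict[str, int]) -> int:
--     zs = []
--     for k in values.keys():
--         if 0 == k.find('z'):
--             zs.append(k)
--     zs = sorted(zs, reverse=True)
--     output: int = 0
--     for z in zs:
--         output *= 2
--         output += values[z]
--     return output
-- ===== SOURCE B (Python) =====
-- def wires_to_num(values: dict[str, int]) -> int:
--     zs = sorted(k for k in values.keys() if k.startswith('z'))
--     return sum(values[z] << i for i, z in enumerate(zs))
-- ===== Notes on version B (the rewrite author's own statement) =====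
-- stated objective: alternative
-- what changed: B sorts the z-prefixed keys ascending and sums each value shifted by its position (value << i), replacing A's descending sort with Horner-style accumulator doubling.
import Mathlib
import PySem

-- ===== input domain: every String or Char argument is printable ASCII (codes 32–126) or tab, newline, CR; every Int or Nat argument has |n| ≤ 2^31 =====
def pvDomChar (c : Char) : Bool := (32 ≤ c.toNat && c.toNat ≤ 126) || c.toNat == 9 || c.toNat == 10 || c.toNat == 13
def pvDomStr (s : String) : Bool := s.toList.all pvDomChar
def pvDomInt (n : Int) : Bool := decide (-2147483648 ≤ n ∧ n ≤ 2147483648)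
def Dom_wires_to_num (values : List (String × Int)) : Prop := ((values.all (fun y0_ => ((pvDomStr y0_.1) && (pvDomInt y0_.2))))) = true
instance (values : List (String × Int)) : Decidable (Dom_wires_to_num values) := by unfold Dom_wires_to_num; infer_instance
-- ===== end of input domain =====

-- B sorts the z-keys ASCENDING and sums values[z] * 2^position (LSB up) instead of
-- A's descending sort with Horner doubling; objective: alternative decomposition (same cost).

-- ===== PORT A =====
-- A: collect keys with k.find('z') == 0, sort reverse=True, Horner fold output = output*2 + values[z].
-- values[z] with z taken from keys() always hits: getD _ 0 is exact here.
def wires_to_num (values : List (String × Int)) : Int :=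
  let d := PySem.Dict.ofList values
  let zs := d.keys.foldl (fun zs k => if PySem.Str.find k "z" = 0 then zs ++ [k] else zs) []
  let zs := PySem.List.sorted zs (fun x => x) true
  zs.foldl (fun output z => output * 2 + d.getD z 0) 0

-- ===== PORT B =====
-- B: zs = sorted(k for k in keys if k.startswith('z')); sum(values[z] << i for i, z in enumerate(zs)).
def wires_to_num_alt (values : List (String × Int)) : Int :=
  let d := PySem.Dict.ofList values
  let zs := PySem.List.sorted (d.keys.filter (fun k => PySem.Str.startswith k "z")) (fun x => x) false
  (PySem.List.enumerate zs 0).foldl (fun acc p => acc + d.getD p.2 0 * 2 ^ p.1.toNat) 0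

-- ===== PRECONDITION & SPEC =====
def Spec_wires_to_num (values : List (String × Int)) (out : Int) : Prop := out = wires_to_num_alt values
instance (values : List (String × Int)) (out : Int) : Decidable (Spec_wires_to_num values out) := by unfold Spec_wires_to_num; infer_instance

-- ===== CLAIM (what is proved, stated in full; the proofs are below) =====
def Claim_equal_wires_to_num : Prop := ∀ (values : List (String × Int)), Dom_wires_to_num values → Spec_wires_to_num values (wires_to_num values)

-- ===== LEMMAS AND PROOFS =====

-- k.find('z') == 0 is exactly startswith
theorem pv_find_z_eq_startswith (k : String) :
    (PySem.Str.find k "z" = 0) ↔ PySem.Str.startswith k "z" = true := by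
  simp only [PySem.Str.find_eq, PySem.Str.startswith_eq, PySem.Chars.startswith_iff]
  constructor
  · intro h
    have := PySem.Chars.find_spec (s := k.toList) (sub := "z".toList) (by omega)
    have h1 := this.1
    rw [h] at h1
    simpa using h1
  · intro hpre
    have h0 : 0 ≤ PySem.Chars.find k.toList "z".toList := by
      rw [PySem.Chars.find_nonneg_iff]
      exact hpre.isInfix
    have hs := PySem.Chars.find_spec (s := k.toList) (sub := "z".toList) h0
    by_contra hne
    have hlt : 0 < (PySem.Chars.find k.toList "z".toList).toNat := by omega
    exact hs.2 0 hlt (by simpa using hpre)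

-- Horner over the reverse equals positional shifts (generalized over start and acc)
theorem pv_shift_fold (f : String → Int) (l : List String) (s : Int) (hs : 0 ≤ s) (acc : Int) :
    (PySem.List.enumerate l s).foldl (fun acc p => acc + f p.2 * 2 ^ p.1.toNat) acc
      = acc + 2 ^ s.toNat * (l.reverse.foldl (fun o z => o * 2 + f z) 0) := by
  induction l generalizing s acc with
  | nil => simp [PySem.List.enumerate]
  | cons x t ih =>
    rw [PySem.List.enumerate_cons]
    simp only [List.foldl_cons, List.reverse_cons, List.foldl_append, List.foldl_cons,
      List.foldl_nil]
    rw [ih (s + 1) (by omega)]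
    have : (s + 1).toNat = s.toNat + 1 := by omega
    rw [this]
    ring

-- the two sorted lists are reverses of each other
theorem pv_sorted_rev_eq (zs : List String) (hnd : zs.Nodup) :
    PySem.List.sorted zs (fun x => x) true
      = (PySem.List.sorted zs (fun x => x) false).reverse := by
  apply PySem.List.sorted_rev_eq_of_perm_of_pairwise_gt
  · exact (List.reverse_perm _).trans (PySem.List.sorted_perm zs (fun x => x) false)
  · rw [List.pairwise_reverse]
    have hle := PySem.List.sorted_pairwise (xs := zs) (key := fun x => x)
    have hne : (PySem.List.sorted zs (fun x => x) false).Nodup :=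
      ((PySem.List.sorted_perm zs (fun x => x) false).nodup_iff).mpr hnd
    have := hle.and hne
    exact this.imp (fun h => lt_of_le_of_ne h.1 h.2)

-- ===== VERDICT (by name: the statement is the Claim_ definition above) =====
theorem wires_to_num_spec : Claim_equal_wires_to_num := by
  intro values _
  unfold Spec_wires_to_num wires_to_num wires_to_num_alt
  simp only []
  set d := PySem.Dict.ofList values with hd
  have hfilter :
      d.keys.foldl (fun zs k => if PySem.Str.find k "z" = 0 then zs ++ [k] else zs) []
        = d.keys.filter (fun k => PySem.Str.startswith k "z") := by
    simp only [pv_find_z_eq_startswith]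
    rw [PySem.List.foldl_append_if]
    simp
  rw [hfilter]
  have hnd : (d.keys.filter (fun k => PySem.Str.startswith k "z")).Nodup :=
    (PySem.Dict.nodup_keys_ofList values).filter _
  rw [pv_sorted_rev_eq _ hnd,
    pv_shift_fold (fun z => d.getD z 0) _ 0 le_rfl 0]
  simp
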